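-- pv_equiv track=rewrite | github.com/Edgardosalas/INF_111 | Python/Laboratorios/Lab8 Funciones/Clasica.py | clasicasbe
-- ===== SOURCE A (Python) =====
-- def clasicasbe(wsbe):
--     tsbe=1; psbe=1
--     for isbe in range(wsbe):
--         ksbe=tsbe
--         psbe=psbe+1
--         if psbe>tsbe:
--             tsbe=tsbe+1
--             psbe=1
--     return ksbe
-- ===== SOURCE B (Python) =====
-- def clasicasbe(wsbe):
--     # Walk block by block: subtract whole block lengths instead of stepping
--     # one position at a time.  O(sqrt(w)) iterations instead of O(w).
--     k = 1
--     w = wsbe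
--     while w > k:
--         w -= k
--         k += 1
--     return k
-- ===== Notes on version B (the rewrite author's own statement) =====
-- stated objective: faster
-- what changed: B subtracts whole triangular-block lengths (O(sqrt w) loop over blocks) instead of A's position-by-position walk maintaining block/position counters (O(w) loop).
import Mathlib
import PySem

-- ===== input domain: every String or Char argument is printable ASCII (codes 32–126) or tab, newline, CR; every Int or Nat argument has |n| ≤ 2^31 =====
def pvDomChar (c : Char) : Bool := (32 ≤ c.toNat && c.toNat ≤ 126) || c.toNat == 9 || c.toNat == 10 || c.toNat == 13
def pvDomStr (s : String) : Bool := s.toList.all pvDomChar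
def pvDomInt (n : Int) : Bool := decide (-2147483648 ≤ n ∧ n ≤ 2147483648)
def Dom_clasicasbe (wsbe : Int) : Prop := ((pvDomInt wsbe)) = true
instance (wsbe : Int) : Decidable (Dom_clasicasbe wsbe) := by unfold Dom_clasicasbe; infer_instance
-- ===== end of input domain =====

-- B replaces A's position-by-position walk by subtracting whole triangular-block
-- lengths (objective: faster, O(sqrt w) loop iterations instead of O(w)).

-- ===== PORT A =====
-- one iteration of A's for-body over state (tsbe, psbe, ksbe); the loop variable is unused
def aStep (s : Int × Int × Int) (_ : Int) : Int × Int × Int :=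
  let t := s.1
  let k := t
  let p := s.2.1 + 1
  if p > t then (t + 1, 1, k) else (t, p, k)

-- Python's ksbe is unbound before the loop (NameError for wsbe ≤ 0, excluded by Pre_);
-- the placeholder 0 in the initial state is never returned when the loop runs at least once.
def clasicasbe (wsbe : Int) : Int :=
  ((PySem.List.pyRange 0 wsbe 1).foldl aStep (1, 1, 0)).2.2

-- ===== PORT B =====
-- while w > k: w -= k; k += 1   (the extra '1 ≤ k' guard only serves termination;
-- altLoop is always called with k = 1 and k only increases, so it never changes the result)
def altLoop (w k : Int) : Int :=
  if _ : 1 ≤ k ∧ k < w then altLoop (w - k) (k + 1) else k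
  termination_by (w - k).toNat
  decreasing_by omega

def clasicasbe_alt (wsbe : Int) : Int := altLoop wsbe 1

-- ===== PRECONDITION & SPEC =====
-- Pre_ excludes wsbe ≤ 0, where A's loop body never runs and A raises NameError (ksbe unbound).
def Pre_clasicasbe (wsbe : Int) : Prop := 1 ≤ wsbe
instance (wsbe : Int) : Decidable (Pre_clasicasbe wsbe) := by unfold Pre_clasicasbe; infer_instance
def pvWitness_clasicasbe : Int := 5

def Spec_clasicasbe (wsbe : Int) (out : Int) : Prop := out = clasicasbe_alt wsbe
instance (wsbe : Int) (out : Int) : Decidable (Spec_clasicasbe wsbe out) := by unfold Spec_clasicasbe; infer_instance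

-- ===== CLAIM (what is proved, stated in full; the proofs are below) =====
def Claim_equal_clasicasbe : Prop := ∀ (wsbe : Int), Dom_clasicasbe wsbe → Pre_clasicasbe wsbe → Spec_clasicasbe wsbe (clasicasbe wsbe)
-- ===== LEMMAS AND PROOFS =====

-- a fold whose body ignores the list element is an iterate
theorem foldl_aStep_iterate (l : List Int) (s : Int × Int × Int) :
    l.foldl aStep s = (fun s => aStep s 0)^[l.length] s := by
  induction l generalizing s with
  | nil => rfl
  | cons a l ih =>
      simp only [List.foldl_cons, List.length_cons, ih]
      rw [Function.iterate_succ_apply]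
      rfl

-- loop invariant of A after n ≥ 1 iterations
def AInv (n : Nat) (s : Int × Int × Int) : Prop :=
  1 ≤ s.2.1 ∧ s.2.1 ≤ s.1 ∧ 2 * ((n : Int) + 1) = s.1 * (s.1 - 1) + 2 * s.2.1 ∧
    s.2.2 = (if s.2.1 = 1 then s.1 - 1 else s.1)

theorem aInv_iterate (n : Nat) (hn : 1 ≤ n) :
    AInv n ((fun s => aStep s 0)^[n] (1, 1, 0)) := by
  induction n with
  | zero => omega
  | succ m ih =>
      rcases Nat.eq_zero_or_pos m with h1 | h1
      · subst h1
        show AInv 1 (aStep (1, 1, 0) 0)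
        norm_num [AInv, aStep]
      · have H := ih h1
        rw [Function.iterate_succ_apply']
        obtain ⟨t, p, k, heq⟩ : ∃ t p k, (fun s => aStep s 0)^[m] (1, 1, 0) = (t, p, k) :=
          ⟨_, _, _, rfl⟩
        rw [heq] at H ⊢
        obtain ⟨h2, h3, h4, -⟩ := H
        simp only [AInv, aStep] at h2 h3 h4 ⊢
        push_cast
        by_cases hc : p + 1 > t
        · have hpt : p = t := by omega
          have hr : (t + 1) * (t + 1 - 1) = t * (t - 1) + 2 * t := by ring
          simp only [if_pos hc]
          refine ⟨by omega, by omega, by rw [hr]; linarith [h4, hpt ▸ h4], by simp⟩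
        · have hp1 : ¬ (p + 1 = 1) := by omega
          simp only [if_neg hc]
          exact ⟨by omega, by omega, by linarith, by simp [hp1]⟩

-- consequence: the k-component brackets 2n between consecutive pronic numbers
theorem aInv_bounds (n : Nat) (s : Int × Int × Int) (hn : 1 ≤ n) (h : AInv n s) :
    1 ≤ s.2.2 ∧ s.2.2 * (s.2.2 - 1) < 2 * (n : Int) ∧ 2 * (n : Int) ≤ s.2.2 * (s.2.2 + 1) := by
  obtain ⟨h1, h2, h3, h4⟩ := h
  have hn' : (1 : Int) ≤ (n : Int) := by exact_mod_cast hn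
  by_cases hp : s.2.1 = 1
  · rw [if_pos hp] at h4
    have ht : 2 * (n : Int) = s.1 * (s.1 - 1) := by rw [hp] at h3; linarith
    have h2' : 1 ≤ s.1 := by omega
    have ht2 : 2 ≤ s.1 := by nlinarith
    refine ⟨by omega, ?_, ?_⟩
    · have : (s.1 - 1) * (s.1 - 1 - 1) = s.1 * (s.1 - 1) - 2 * (s.1 - 1) := by ring
      rw [h4, this]; nlinarith
    · have : (s.1 - 1) * (s.1 - 1 + 1) = s.1 * (s.1 - 1) := by ring
      rw [h4, this]; linarith
  · rw [if_neg hp] at h4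
    have hp2 : 2 ≤ s.2.1 := by omega
    refine ⟨by omega, ?_, ?_⟩
    · rw [h4]; linarith
    · rw [h4]; nlinarith

-- B's loop brackets 2w (shifted by the blocks already consumed)
theorem altLoop_bounds (w k : Int) (hk : 1 ≤ k) (hw : 1 ≤ w) :
    k ≤ altLoop w k ∧
      altLoop w k * (altLoop w k - 1) - k * (k - 1) < 2 * w ∧
      2 * w ≤ altLoop w k * (altLoop w k + 1) - k * (k - 1) := by
  induction w, k using altLoop.induct with
  | case1 w k h ih =>
      have := ih (by omega) (by omega)
      rw [altLoop, dif_pos h]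
      constructor
      · omega
      · constructor <;> nlinarith [this.1, this.2.1, this.2.2]
  | case2 w k h =>
      rw [altLoop, dif_neg h]
      have hwk : w ≤ k := by omega
      have hr : k * (k + 1) - k * (k - 1) = 2 * k := by ring
      have hr2 : k * (k - 1) - k * (k - 1) = 0 := by ring
      exact ⟨le_refl _, by omega, by omega⟩

-- the bracketing determines the value uniquely
theorem bracket_unique (r s w : Int) (hr : 1 ≤ r) (hs : 1 ≤ s)
    (h1 : r * (r - 1) < 2 * w) (h2 : 2 * w ≤ r * (r + 1))
    (h3 : s * (s - 1) < 2 * w) (h4 : 2 * w ≤ s * (s + 1)) : r = s := by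
  rcases lt_trichotomy r s with h | h | h
  · exfalso; nlinarith
  · exact h
  · exfalso; nlinarith

-- ===== VERDICT (by name: the statement is the Claim_ definition above) =====
theorem clasicasbe_spec : Claim_equal_clasicasbe := by
  intro w _ hw
  have hw1 : (1 : Int) ≤ w := hw
  unfold Spec_clasicasbe clasicasbe clasicasbe_alt
  have hlen : (PySem.List.pyRange 0 w 1).length = w.toNat := by
    rw [PySem.List.length_pyRange_one]; congr 1; omega
  rw [foldl_aStep_iterate, hlen]
  have hn : 1 ≤ w.toNat := by omega
  have hA := aInv_bounds _ _ hn (aInv_iterate _ hn)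
  have hcast : ((w.toNat : Int)) = w := by omega
  rw [hcast] at hA
  have hB := altLoop_bounds w 1 (le_refl _) hw1
  exact bracket_unique _ _ w hA.1 (by omega)
    hA.2.1 hA.2.2 (by nlinarith [hB.1, hB.2.1]) (by nlinarith [hB.2.2])
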